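-- pv_equiv track=rewrite | github.com/anotherSimpleCoder/scale_gen | main.py | req_check
-- ===== SOURCE A (Python) =====
-- def req_check(val):
--     problems = [
--         val % 2 == 0,
--         val % 3 == 0,
--
--         val % 5 == 0,
--         val % 7 == 0,
--
--         val % 11 == 0,
--         val % 13 == 0,
--
--         val % 17 == 0,
--         val % 19 == 0,
--
--         val % 23 == 0,
--         val % 29 == 0,
--
--         val % 31 == 0,
--         val % 37 == 0,
--
--         val % 41 == 0,
--
--         val % 43 == 0,
--         val % 47 == 0
--     ]
--
--     status = False
--
--     for x in problems:
--         status = status or x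
--
--     return status
-- ===== SOURCE B (Python) =====
-- # Product of the fifteen listed primes; val is divisible by one of them
-- # iff it shares a factor with this product.
-- _P = 614889782588491410
--
--
-- def req_check(val):
--     a, b = abs(val), _P
--     while b:
--         a, b = b, a % b
--     return a != 1
-- ===== Notes on version B (the rewrite author's own statement) =====
-- stated objective: alternative
-- what changed: Replaces the per-prime modulo tests folded through a boolean loop by a single Euclidean gcd of |val| with the constant product of the fifteen listed primes, returning whether that gcd is not one.
import Mathlib
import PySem

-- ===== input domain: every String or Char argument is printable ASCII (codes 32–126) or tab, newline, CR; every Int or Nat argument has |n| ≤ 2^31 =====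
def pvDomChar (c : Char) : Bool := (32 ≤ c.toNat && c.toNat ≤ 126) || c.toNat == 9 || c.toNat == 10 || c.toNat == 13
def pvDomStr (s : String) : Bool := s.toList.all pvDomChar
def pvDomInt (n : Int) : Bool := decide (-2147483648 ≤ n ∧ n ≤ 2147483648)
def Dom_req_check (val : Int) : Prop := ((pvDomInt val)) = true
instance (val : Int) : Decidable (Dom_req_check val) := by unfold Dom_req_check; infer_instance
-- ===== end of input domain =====

-- B replaces the per-prime modulo tests by one Euclidean gcd with the constant product of the fifteen listed primes (alternative algorithm, same cost).

-- ===== PORT A =====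
def req_check (val : Int) : Bool :=
  let problems : List Bool := [
    PySem.Int.mod val 2 == 0,
    PySem.Int.mod val 3 == 0,
    PySem.Int.mod val 5 == 0,
    PySem.Int.mod val 7 == 0,
    PySem.Int.mod val 11 == 0,
    PySem.Int.mod val 13 == 0,
    PySem.Int.mod val 17 == 0,
    PySem.Int.mod val 19 == 0,
    PySem.Int.mod val 23 == 0,
    PySem.Int.mod val 29 == 0,
    PySem.Int.mod val 31 == 0,
    PySem.Int.mod val 37 == 0,
    PySem.Int.mod val 41 == 0,
    PySem.Int.mod val 43 == 0,
    PySem.Int.mod val 47 == 0]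
  problems.foldl (fun status x => status || x) false

-- ===== PORT B =====
-- the `while b: a, b = b, a % b` Euclid loop of Source B
def pyGcd (a b : Nat) : Nat :=
  if h : b = 0 then a else pyGcd b (a % b)
termination_by b
decreasing_by exact Nat.mod_lt _ (Nat.pos_of_ne_zero h)

def req_check_alt (val : Int) : Bool :=
  pyGcd val.natAbs 614889782588491410 != 1

-- ===== PRECONDITION & SPEC =====
def Spec_req_check (val : Int) (out : Bool) : Prop := out = req_check_alt val
instance (val : Int) (out : Bool) : Decidable (Spec_req_check val out) := by unfold Spec_req_check; infer_instance

-- ===== CLAIM (what is proved, stated in full; the proofs are below) =====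
def Claim_equal_req_check : Prop := ∀ (val : Int), Dom_req_check val → Spec_req_check val (req_check val)

-- ===== LEMMAS AND PROOFS =====
theorem pyGcd_eq_gcd (a b : Nat) : pyGcd a b = Nat.gcd b a := by
  induction a, b using pyGcd.induct with
  | case1 a => simp [pyGcd]
  | case2 a b h ih =>
    rw [pyGcd, dif_neg h, ih]; exact (Nat.gcd_rec b a).symm

theorem gcd_prod_ne_one (n : Nat) :
    Nat.gcd 614889782588491410 n ≠ 1 ↔
      (2 ∣ n ∨ 3 ∣ n ∨ 5 ∣ n ∨ 7 ∣ n ∨ 11 ∣ n ∨ 13 ∣ n ∨ 17 ∣ n ∨ 19 ∣ n ∨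
       23 ∣ n ∨ 29 ∣ n ∨ 31 ∣ n ∨ 37 ∣ n ∨ 41 ∣ n ∨ 43 ∣ n ∨ 47 ∣ n) := by
  have hP : (614889782588491410 : Nat) =
      2*3*5*7*11*13*17*19*23*29*31*37*41*43*47 := by norm_num
  have hco : Nat.gcd 614889782588491410 n = 1 ↔ Nat.Coprime 614889782588491410 n := Iff.rfl
  rw [← not_iff_not, not_not, hco, hP]
  simp only [Nat.coprime_mul_iff_left,
    Nat.Prime.coprime_iff_not_dvd (by norm_num : Nat.Prime 2),
    Nat.Prime.coprime_iff_not_dvd (by norm_num : Nat.Prime 3),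
    Nat.Prime.coprime_iff_not_dvd (by norm_num : Nat.Prime 5),
    Nat.Prime.coprime_iff_not_dvd (by norm_num : Nat.Prime 7),
    Nat.Prime.coprime_iff_not_dvd (by norm_num : Nat.Prime 11),
    Nat.Prime.coprime_iff_not_dvd (by norm_num : Nat.Prime 13),
    Nat.Prime.coprime_iff_not_dvd (by norm_num : Nat.Prime 17),
    Nat.Prime.coprime_iff_not_dvd (by norm_num : Nat.Prime 19),
    Nat.Prime.coprime_iff_not_dvd (by norm_num : Nat.Prime 23),
    Nat.Prime.coprime_iff_not_dvd (by norm_num : Nat.Prime 29),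
    Nat.Prime.coprime_iff_not_dvd (by norm_num : Nat.Prime 31),
    Nat.Prime.coprime_iff_not_dvd (by norm_num : Nat.Prime 37),
    Nat.Prime.coprime_iff_not_dvd (by norm_num : Nat.Prime 41),
    Nat.Prime.coprime_iff_not_dvd (by norm_num : Nat.Prime 43),
    Nat.Prime.coprime_iff_not_dvd (by norm_num : Nat.Prime 47)]
  tauto

-- ===== VERDICT (by name: the statement is the Claim_ definition above) =====
theorem req_check_spec : Claim_equal_req_check := by
  intro val _
  unfold Spec_req_check
  rw [Bool.eq_iff_iff]
  simp only [req_check, req_check_alt, List.foldl, Bool.or_eq_true, Bool.false_or,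
    beq_iff_eq, PySem.Int.mod_eq_zero_iff_dvd, bne_iff_ne,
    pyGcd_eq_gcd]
  rw [gcd_prod_ne_one]
  simp only [← Int.natCast_dvd_natCast, Int.dvd_natAbs, Nat.cast_ofNat]
  tauto
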